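-- pv_equiv track=rewrite | github.com/matsagad/game-theory-shenanigans | openspiel__cheat/cheat.py | hand_bits_to_nums
-- ===== SOURCE A (Python) =====
-- _NUM_NUMBERS = 6
--
-- def hand_bits_to_nums(hand):
--     nums = []
--     curr = 1
--     while hand:
--         if hand % 2 == 1:
--             nums.append(curr)
--         hand >>= 1
--         curr = _NUM_NUMBERS - (-(curr + 1) % _NUM_NUMBERS)
--     return sorted(nums)
-- ===== SOURCE B (Python) =====
-- def hand_bits_to_nums(hand):
--     # Residue-class grouping: bit position p encodes the rank p % _NUM_NUMBERS
--     # plus one, so for each residue r count the set bits at positions congruent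
--     # to r and emit that many copies of the rank; iterating the residues in
--     # increasing order yields the list already sorted.
--     res = []
--     for r in range(6):
--         c, p = 0, r
--         while p < hand.bit_length():
--             if (hand >> p) & 1:
--                 c += 1
--             p += 6
--         res.extend([r + 1] * c)
--     return res
-- ===== Notes on version B (the rewrite author's own statement) =====
-- stated objective: alternative
-- what changed: B replaces A's bit-by-bit scan with a cycling rank counter followed by a final sort by residue-class grouping: for each residue class of bit positions modulo six it counts the set bits in that class with a strided scan and emits that many copies of the corresponding rank, producing the list already sorted with no sort call.
import Mathlib
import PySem

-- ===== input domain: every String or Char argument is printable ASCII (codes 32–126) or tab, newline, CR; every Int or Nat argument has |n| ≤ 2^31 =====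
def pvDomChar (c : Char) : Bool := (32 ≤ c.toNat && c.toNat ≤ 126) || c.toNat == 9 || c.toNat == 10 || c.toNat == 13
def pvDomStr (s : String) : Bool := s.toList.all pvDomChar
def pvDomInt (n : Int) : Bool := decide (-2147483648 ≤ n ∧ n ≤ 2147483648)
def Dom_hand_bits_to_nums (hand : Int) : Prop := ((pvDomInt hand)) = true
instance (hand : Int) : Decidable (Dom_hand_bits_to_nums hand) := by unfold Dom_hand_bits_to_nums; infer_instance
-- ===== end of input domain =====

-- B replaces A's per-bit scan + final sort by residue-class grouping (per residue class
-- of bit positions, count the set bits and emit the matching rank that many times,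
-- already sorted); objective: alternative.

-- ===== PORT A =====
-- A's while loop; the loop runs on hand.toNat since Pre_ restricts to 0 ≤ hand
-- (on negative hand the Python loop never terminates).
def aLoop (h : Nat) (curr : Int) (nums : List Int) : List Int :=
  if h = 0 then nums
  else
    aLoop (h / 2) (6 - PySem.Int.mod (-(curr + 1)) 6)
      (if h % 2 = 1 then nums ++ [curr] else nums)
termination_by h
decreasing_by exact Nat.div_lt_self (Nat.pos_of_ne_zero (by assumption)) one_lt_two

def hand_bits_to_nums (hand : Int) : List Int :=
  PySem.List.sorted (aLoop hand.toNat 1 []) (fun x => x) false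

-- ===== PORT B =====
-- port of int.bit_length for nonnegative ints
def bitLen (n : Nat) : Nat :=
  if n = 0 then 0 else bitLen (n / 2) + 1
termination_by n
decreasing_by exact Nat.div_lt_self (Nat.pos_of_ne_zero (by assumption)) one_lt_two

-- B's inner while loop: count set bits at positions congruent to p modulo six, below bitLen
def countRes (n p : Nat) : Nat :=
  if p < bitLen n then (if (n >>> p) &&& 1 = 1 then 1 else 0) + countRes n (p + 6)
  else 0
termination_by bitLen n - p
decreasing_by omega

def hand_bits_to_nums_alt (hand : Int) : List Int :=
  (List.range 6).foldl
    (fun res r => res ++ List.replicate (countRes hand.toNat r) ((r : Int) + 1)) []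

-- ===== PRECONDITION & SPEC =====
-- Pre_ excludes negative hand: there A's 'while hand: … hand >>= 1' never terminates
-- (arithmetic right shift of a negative int stays negative), so A returns no value.
def Pre_hand_bits_to_nums (hand : Int) : Prop := 0 ≤ hand
instance (hand : Int) : Decidable (Pre_hand_bits_to_nums hand) := by
  unfold Pre_hand_bits_to_nums; infer_instance
def pvWitness_hand_bits_to_nums : Int := 45

def Spec_hand_bits_to_nums (hand : Int) (out : List Int) : Prop := out = hand_bits_to_nums_alt hand
instance (hand : Int) (out : List Int) : Decidable (Spec_hand_bits_to_nums hand out) := by unfold Spec_hand_bits_to_nums; infer_instance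

-- ===== CLAIM (what is proved, stated in full; the proofs are below) =====
def Claim_equal_hand_bits_to_nums : Prop := ∀ (hand : Int), Dom_hand_bits_to_nums hand → Pre_hand_bits_to_nums hand → Spec_hand_bits_to_nums hand (hand_bits_to_nums hand)

-- ===== LEMMAS AND PROOFS =====

-- positions of the set bits of n, in increasing order
def bitsOf (n : Nat) : List Nat :=
  if n = 0 then [] else (if n % 2 = 1 then [0] else []) ++ (bitsOf (n / 2)).map (· + 1)
termination_by n
decreasing_by exact Nat.div_lt_self (Nat.pos_of_ne_zero (by assumption)) one_lt_two

-- the rank carried by bit position k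
def rk (k : Nat) : Int := ((k % 6 : Nat) : Int) + 1

theorem rk_step (k : Nat) : (6 : Int) - PySem.Int.mod (-(rk k + 1)) 6 = rk (k + 1) := by
  have h6 : (k + 1) % 6 = (k % 6 + 1) % 6 := by omega
  have hm : k % 6 < 6 := Nat.mod_lt _ (by norm_num)
  unfold rk
  rw [h6]
  interval_cases h : k % 6 <;> simp [PySem.Int.mod]

theorem aLoop_eq (n : Nat) :
    ∀ (k : Nat) (nums : List Int),
      aLoop n (rk k) nums = nums ++ (bitsOf n).map (fun i => rk (k + i)) := by
  induction n using Nat.strong_induction_on with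
  | _ n ih =>
    intro k nums
    rw [aLoop, bitsOf]
    by_cases h : n = 0
    · simp [h]
    · simp only [h, if_false]
      rw [rk_step k, ih (n / 2) (Nat.div_lt_self (Nat.pos_of_ne_zero h) one_lt_two) (k + 1)]
      by_cases h2 : n % 2 = 1 <;>
        simp [h2, List.map_map, Function.comp] <;>
        (intro a _; congr 1; omega)

theorem bitsOf_filter (n : Nat) :
    bitsOf n = (List.range (bitLen n)).filter (fun i => n / 2 ^ i % 2 == 1) := by
  induction n using Nat.strong_induction_on with
  | _ n ih =>
    rw [bitsOf, bitLen]
    by_cases h : n = 0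
    · simp [h]
    · simp only [h, if_false]
      rw [List.range_succ_eq_map, ih (n / 2) (Nat.div_lt_self (Nat.pos_of_ne_zero h) one_lt_two)]
      rw [List.filter_cons, List.filter_map]
      have hdiv : ∀ i : Nat, n / 2 ^ (i + 1) = n / 2 / 2 ^ i := by
        intro i
        rw [Nat.div_div_eq_div_mul, pow_succ']
      have hfun : ((fun i => n / 2 ^ i % 2 == 1) ∘ Nat.succ) = (fun i => n / 2 / 2 ^ i % 2 == 1) := by
        funext i
        simp [Function.comp, hdiv i]
      by_cases h2 : n % 2 = 1 <;>
        simp [h2, hfun, pow_zero, Nat.div_one]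

theorem countP_single {α : Type} [DecidableEq α] (l : List α) (hl : l.Nodup) (p : α) (r : α → Bool) :
    l.countP (fun i => r i && (i == p)) = if p ∈ l ∧ r p then 1 else 0 := by
  induction l with
  | nil => simp
  | cons a t iht =>
    rw [List.countP_cons]
    rcases List.nodup_cons.mp hl with ⟨hna, hnd⟩
    by_cases hap : a = p
    · subst hap
      have : t.countP (fun i => r i && (i == a)) = 0 := by
        rw [List.countP_eq_zero]
        intro x hx
        simp only [Bool.and_eq_true, beq_iff_eq, not_and]
        intro _ hxa; exact hna (hxa ▸ hx)
      rw [this]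
      by_cases hr : r a = true <;> simp [hr]
    · rw [iht hnd]
      have : (r a && (a == p)) = false := by simp [hap]
      rw [this]
      by_cases hp : p ∈ t <;> simp [hp, Ne.symm hap]

theorem countP_and_split {α : Type} (l : List α) (p q : α → Bool) :
    l.countP p = l.countP (fun a => p a && q a) + l.countP (fun a => p a && !q a) := by
  induction l with
  | nil => simp
  | cons a t iht =>
    simp only [List.countP_cons]
    cases hp : p a <;> cases hq : q a <;> simp [iht] <;> omega

theorem shift_and_one (n p : Nat) : (n >>> p) &&& 1 = n / 2 ^ p % 2 := by
  rw [Nat.shiftRight_eq_div_pow, Nat.and_one_is_mod]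

theorem countRes_eq_countP (n : Nat) :
    ∀ p : Nat,
      countRes n p =
        (List.range (bitLen n)).countP
          (fun i => (n / 2 ^ i % 2 == 1) && (p ≤ i) && (i % 6 == p % 6)) := by
  intro p
  induction hfuel : bitLen n - p using Nat.strong_induction_on generalizing p with
  | _ fuel ih =>
    rw [countRes]
    by_cases h : p < bitLen n
    · rw [if_pos h, shift_and_one]
      rw [ih (bitLen n - (p + 6)) (by omega) (p + 6) rfl]
      rw [countP_and_split (q := fun i => i == p)
            (p := fun i => (n / 2 ^ i % 2 == 1) && (p ≤ i) && (i % 6 == p % 6))]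
      have h1 : (List.range (bitLen n)).countP
          (fun i => ((n / 2 ^ i % 2 == 1) && (p ≤ i) && (i % 6 == p % 6)) && (i == p))
          = if n / 2 ^ p % 2 = 1 then 1 else 0 := by
        rw [countP_single _ (List.nodup_range) p]
        by_cases hb : n / 2 ^ p % 2 = 1 <;> simp [hb, List.mem_range, h]
      have h2 : (List.range (bitLen n)).countP
          (fun i => ((n / 2 ^ i % 2 == 1) && (p ≤ i) && (i % 6 == p % 6)) && !(i == p))
          = (List.range (bitLen n)).countP
          (fun i => (n / 2 ^ i % 2 == 1) && (p + 6 ≤ i) && (i % 6 == (p + 6) % 6)) := by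
        apply List.countP_congr
        intro i _
        by_cases hbi : n / 2 ^ i % 2 = 1 <;> simp [hbi] <;> omega
      rw [h1, h2]
    · rw [if_neg h]
      symm
      rw [List.countP_eq_zero]
      intro i hi
      simp only [List.mem_range] at hi
      simp only [Bool.and_eq_true, beq_iff_eq, decide_eq_true_eq, not_and]
      intro _ hpi
      omega

-- count of set bits of n in residue class r (r < 6)
theorem countRes_eq_bits (n r : Nat) (hr : r < 6) :
    countRes n r = (bitsOf n).countP (fun i => i % 6 == r) := by
  rw [countRes_eq_countP n r, bitsOf_filter, List.countP_filter]
  apply List.countP_congr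
  intro i _
  have : i % 6 ≤ i := Nat.mod_le _ _
  by_cases hb : n / 2 ^ i % 2 = 1 <;> by_cases hm : i % 6 = r <;>
    simp [hb, hm, Nat.mod_eq_of_lt hr] <;> try omega

theorem B_flat (hand : Int) :
    hand_bits_to_nums_alt hand =
      (List.range 6).flatMap
        (fun r => List.replicate (countRes hand.toNat r) ((r : Int) + 1)) := by
  unfold hand_bits_to_nums_alt
  rw [PySem.List.foldl_append_eq_flatMap]
  simp

theorem count_map_rk (l : List Nat) (v : Int) :
    (l.map rk).count v = l.countP (fun i => rk i == v) := by
  induction l with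
  | nil => simp
  | cons a t iht =>
    by_cases h : rk a = v <;>
      simp [iht, h]

theorem B_perm (n : Nat) :
    ((List.range 6).flatMap
        (fun r => List.replicate (countRes n r) ((r : Int) + 1))).Perm
      ((bitsOf n).map rk) := by
  rw [List.perm_iff_count]
  intro v
  have hexp : (List.range 6) = [0, 1, 2, 3, 4, 5] := by decide
  rw [hexp]
  simp only [List.flatMap_cons, List.flatMap_nil, List.append_nil, List.count_append,
    List.count_replicate, count_map_rk]
  by_cases h1 : v = 1
  · subst h1
    rw [countRes_eq_bits n 0 (by norm_num)]
    have : ∀ i, (rk i == (1 : Int)) = (i % 6 == 0) := by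
      intro i; unfold rk
      have : i % 6 < 6 := Nat.mod_lt _ (by norm_num)
      by_cases h : i % 6 = 0 <;> simp [h] <;> omega
    simp [this]
  · by_cases h2 : v = 2
    · subst h2
      rw [countRes_eq_bits n 1 (by norm_num)]
      have : ∀ i, (rk i == (2 : Int)) = (i % 6 == 1) := by
        intro i; unfold rk
        have : i % 6 < 6 := Nat.mod_lt _ (by norm_num)
        by_cases h : i % 6 = 1 <;> simp [h] <;> omega
      simp [this]
    · by_cases h3 : v = 3
      · subst h3
        rw [countRes_eq_bits n 2 (by norm_num)]
        have : ∀ i, (rk i == (3 : Int)) = (i % 6 == 2) := by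
          intro i; unfold rk
          have : i % 6 < 6 := Nat.mod_lt _ (by norm_num)
          by_cases h : i % 6 = 2 <;> simp [h] <;> omega
        simp [this]
      · by_cases h4 : v = 4
        · subst h4
          rw [countRes_eq_bits n 3 (by norm_num)]
          have : ∀ i, (rk i == (4 : Int)) = (i % 6 == 3) := by
            intro i; unfold rk
            have : i % 6 < 6 := Nat.mod_lt _ (by norm_num)
            by_cases h : i % 6 = 3 <;> simp [h] <;> omega
          simp [this]
        · by_cases h5 : v = 5
          · subst h5
            rw [countRes_eq_bits n 4 (by norm_num)]
            have : ∀ i, (rk i == (5 : Int)) = (i % 6 == 4) := by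
              intro i; unfold rk
              have : i % 6 < 6 := Nat.mod_lt _ (by norm_num)
              by_cases h : i % 6 = 4 <;> simp [h] <;> omega
            simp [this]
          · by_cases h6 : v = 6
            · subst h6
              rw [countRes_eq_bits n 5 (by norm_num)]
              have : ∀ i, (rk i == (6 : Int)) = (i % 6 == 5) := by
                intro i; unfold rk
                have : i % 6 < 6 := Nat.mod_lt _ (by norm_num)
                by_cases h : i % 6 = 5 <;> simp [h] <;> omega
              simp [this]
            · have hz : (bitsOf n).countP (fun i => rk i == v) = 0 := by
                rw [List.countP_eq_zero]
                intro i _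
                unfold rk
                have : i % 6 < 6 := Nat.mod_lt _ (by norm_num)
                simp only [beq_iff_eq]
                omega
              rw [hz]
              simp
              exact ⟨fun h => absurd h.symm h1, fun h => absurd h.symm h2,
                fun h => absurd h.symm h3, fun h => absurd h.symm h4,
                fun h => absurd h.symm h5, fun h => absurd h.symm h6⟩

theorem B_sorted (n : Nat) :
    ((List.range 6).flatMap
        (fun r => List.replicate (countRes n r) ((r : Int) + 1))).Pairwise (· ≤ ·) := by
  have hexp : (List.range 6) = [0, 1, 2, 3, 4, 5] := by decide
  rw [hexp]
  simp only [List.flatMap_cons, List.flatMap_nil, List.append_nil]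
  simp only [List.pairwise_append, List.pairwise_replicate, List.mem_append,
    List.mem_replicate]
  and_intros <;> intros <;> omega

-- ===== VERDICT (by name: the statement is the Claim_ definition above) =====
theorem hand_bits_to_nums_spec : Claim_equal_hand_bits_to_nums := by
  intro hand _ hpre
  unfold Spec_hand_bits_to_nums hand_bits_to_nums
  rw [B_flat]
  set n := hand.toNat with hn
  have hA : aLoop n 1 [] = (bitsOf n).map rk := by
    have h0 : rk 0 = 1 := by decide
    have := aLoop_eq n 0 []
    rw [h0] at this
    simpa using this
  rw [hA]
  apply PySem.List.eq_of_perm_of_pairwise_le_of_injective (key := fun x => x)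
    (fun a b h => h)
  · exact ((PySem.List.sorted_perm _ _ _).trans (B_perm n).symm)
  · exact PySem.List.sorted_pairwise _ _
  · exact B_sorted n
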